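-- pv_equiv track=rewrite | github.com/smitkesaria/tricopter | tricopter_py/tricopter_py/crsf.py | crsf2pwm
-- ===== SOURCE A (Python) =====
-- def crsf2pwm(byte_array):
--     bit_stream = 0
--     bit_count = 0
--     decoded_values = []
--
--     for byte in byte_array:
--         # Add the new byte to the bit_stream (LSB first)
--         bit_stream |= (byte << bit_count)
--         bit_count += 8
--
--         # While we have enough bits to extract an 11-bit value
--         while bit_count >= 11:
--             # Extract the 11-bit value from the bit_stream
--             decoded_value = bit_stream & 0x7FF  # 0x7FF is 11 bits of 1s
--             decoded_values.append(int((decoded_value-992)*512/820+1500))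
--
--             # Remove the extracted 11 bits from the bit_stream
--             bit_stream >>= 11
--             bit_count -= 11
--
--     return decoded_values
-- ===== SOURCE B (Python) =====
-- def crsf2pwm(byte_array):
--     # Build-then-extract: fold all bytes into one big integer (OR at 8-bit
--     # offsets, preserving Python semantics for out-of-range/negative bytes),
--     # then pull out floor(8n/11) 11-bit fields and scale each to PWM with
--     # exact integer arithmetic.
--     big = 0
--     n = 0
--     for byte in byte_array:
--         big |= byte << (8 * n)
--         n += 1
--     pwm = []
--     for _ in range((8 * n) // 11):
--         value = big & 0x7FF
--         pwm.append((value - 992) * 512 // 820 + 1500)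
--         big >>= 11
--     return pwm
-- ===== Notes on version B (the rewrite author's own statement) =====
-- stated objective: alternative
-- what changed: Replaces A's interleaved per-byte inner while-loop with running bit_stream/bit_count state by a build-then-extract decomposition: one fold ORs every byte into a single big integer, the channel count is computed in closed form as (8*n)//11, and a second loop extracts the 11-bit fields; the float scaling expression int((v-992)*512/820+1500) is replaced by exact integer arithmetic (v-992)*512//820+1500, which agrees for every possible 11-bit field value.
import Mathlib
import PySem

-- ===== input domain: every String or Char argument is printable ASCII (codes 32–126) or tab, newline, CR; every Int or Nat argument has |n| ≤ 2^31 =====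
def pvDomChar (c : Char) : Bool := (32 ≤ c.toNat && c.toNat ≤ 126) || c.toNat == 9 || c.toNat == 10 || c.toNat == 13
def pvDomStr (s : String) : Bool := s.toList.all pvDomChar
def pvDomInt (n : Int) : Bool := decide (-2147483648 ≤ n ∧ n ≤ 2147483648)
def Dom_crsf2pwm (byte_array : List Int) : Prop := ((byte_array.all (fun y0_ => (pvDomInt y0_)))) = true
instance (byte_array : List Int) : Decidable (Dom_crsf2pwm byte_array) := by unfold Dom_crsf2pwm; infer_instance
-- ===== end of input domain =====

-- B replaces A's interleaved per-byte inner while-loop (running bit_stream/bit_count) by a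
-- build-then-extract decomposition: fold all bytes into one big integer, then extract
-- floor(8n/11) 11-bit fields; same return value, no claim beyond the theorems below.

-- ===== PORT A =====
-- Python: int((decoded_value-992)*512/820+1500). decoded_value = bit_stream & 0x7FF is always in
-- [0,2047]; on that range the float expression truncates to exactly (v-992)*512//820 + 1500
-- (the exact value is never closer than 1/205 to a wrong integer, far above double rounding error),
-- so the integer port below (floordiv + 1500) is exact.

-- the inner `while bit_count >= 11` loop
def crsfWhile (stream : Int) (count : Int) (acc : List Int) : Int × Int × List Int :=
  if _h : 11 ≤ count then
    crsfWhile (stream >>> (11 : Nat)) (count - 11)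
      (acc ++ [PySem.Int.floordiv ((PySem.Int.band stream 2047 - 992) * 512) 820 + 1500])
  else (stream, count, acc)
termination_by count.toNat
decreasing_by omega

-- the body of the `for byte in byte_array` loop; bit_count is always ≥ 0, so `.toNat` on the
-- shift amount is exact
def aStep (st : Int × Int × List Int) (byte : Int) : Int × Int × List Int :=
  crsfWhile (PySem.Int.bor st.1 (byte <<< st.2.1.toNat)) (st.2.1 + 8) st.2.2

def crsf2pwm (byte_array : List Int) : List Int :=
  (byte_array.foldl aStep ((0 : Int), (0 : Int), ([] : List Int))).2.2

-- ===== PORT B =====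
-- body of B's first loop: big |= byte << (8*n); n += 1   (n ≥ 0, so `.toNat` is exact)
def bStep (st : Int × Int) (byte : Int) : Int × Int :=
  (PySem.Int.bor st.1 (byte <<< (8 * st.2).toNat), st.2 + 1)

-- B's second loop: for _ in range(k): append scale(big & 0x7FF); big >>= 11
def extractLoop : Nat → Int → List Int → List Int
  | 0, _, pwm => pwm
  | k + 1, big, pwm =>
      extractLoop k (big >>> (11 : Nat))
        (pwm ++ [PySem.Int.floordiv ((PySem.Int.band big 2047 - 992) * 512) 820 + 1500])

def crsf2pwm_alt (byte_array : List Int) : List Int :=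
  let st := byte_array.foldl bStep ((0 : Int), (0 : Int))
  extractLoop (PySem.Int.floordiv (8 * st.2) 11).toNat st.1 []

-- ===== PRECONDITION & SPEC =====
def Spec_crsf2pwm (byte_array : List Int) (out : List Int) : Prop := out = crsf2pwm_alt byte_array
instance (byte_array : List Int) (out : List Int) : Decidable (Spec_crsf2pwm byte_array out) := by unfold Spec_crsf2pwm; infer_instance

-- ===== CLAIM (what is proved, stated in full; the proofs are below) =====
def Claim_equal_crsf2pwm : Prop := ∀ (byte_array : List Int), Dom_crsf2pwm byte_array → Spec_crsf2pwm byte_array (crsf2pwm byte_array)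

-- ===== LEMMAS AND PROOFS =====

-- constructor shapes of PySem.Int.bor / band
theorem bor_ofNat_negSucc (m n : Nat) :
    PySem.Int.bor (Int.ofNat m) (Int.negSucc n) = Int.negSucc (n - (n &&& m)) := by
  simp [PySem.Int.bor, Int.negSucc_eq]
  rw [if_neg (by omega)]
  omega

theorem bor_negSucc_ofNat (m n : Nat) :
    PySem.Int.bor (Int.negSucc m) (Int.ofNat n) = Int.negSucc (m - (m &&& n)) := by
  simp [PySem.Int.bor, Int.negSucc_eq]
  rw [if_neg (by omega)]
  omega

theorem bor_negSucc_negSucc (m n : Nat) :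
    PySem.Int.bor (Int.negSucc m) (Int.negSucc n) = Int.negSucc (m &&& n) := by
  simp [PySem.Int.bor, Int.negSucc_eq]
  rw [if_neg (by omega), if_neg (by omega)]
  omega

-- band with the literal mask 0x7FF is `% 2048` (Python-style, = Int.emod for positive modulus)
theorem band_mask (z : Int) : PySem.Int.band z 2047 = z % 2048 := by
  cases z with
  | ofNat m =>
      have h := Nat.and_two_pow_sub_one_eq_mod m 11
      norm_num at h
      simp [PySem.Int.band, Int.ofNat_eq_natCast]
      omega
  | negSucc n =>
      have h := Nat.and_two_pow_sub_one_eq_mod n 11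
      norm_num at h
      have h2 : 2047 &&& n = n &&& 2047 := Nat.and_comm _ _
      simp [PySem.Int.band, Int.negSucc_eq]
      rw [if_neg (by omega)]
      omega

-- (x &&& y) &&& 2047 = (x &&& 2047) &&& (y &&& 2047)
theorem and_and_mask (x y : Nat) : (x &&& y) &&& 2047 = (x &&& 2047) &&& (y &&& 2047) := by
  apply Nat.eq_of_testBit_eq
  intro i
  simp only [Nat.testBit_and]
  cases x.testBit i <;> cases y.testBit i <;> simp

theorem and_mod (x y : Nat) : (x &&& y) % 2048 = (x % 2048) &&& (y % 2048) := by
  have h1 := Nat.and_two_pow_sub_one_eq_mod (x &&& y) 11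
  have h2 := Nat.and_two_pow_sub_one_eq_mod x 11
  have h3 := Nat.and_two_pow_sub_one_eq_mod y 11
  norm_num at h1 h2 h3
  rw [← h1, ← h2, ← h3]
  exact and_and_mask x y

theorem nat_sub_and_shift (n m : Nat) :
    (n - (n &&& m)) >>> 11 = (n >>> 11) - ((n >>> 11) &&& (m >>> 11)) := by
  have h3 : (n >>> 11) &&& (m >>> 11) = (n &&& m) >>> 11 := Nat.shiftRight_and_distrib.symm
  have h1 : n &&& m ≤ n := Nat.and_le_left
  have h2 : (n &&& m) % 2048 ≤ n % 2048 := by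
    rw [and_mod]; exact Nat.and_le_left
  rw [h3]
  simp only [Nat.shiftRight_eq_div_pow]
  norm_num
  omega

theorem or_mod (x y : Nat) : (x ||| y) % 2048 = (x % 2048) ||| (y % 2048) := by
  have h1 := Nat.and_two_pow_sub_one_eq_mod (x ||| y) 11
  have h2 := Nat.and_two_pow_sub_one_eq_mod x 11
  have h3 := Nat.and_two_pow_sub_one_eq_mod y 11
  norm_num at h1 h2 h3
  rw [← h1, ← h2, ← h3]
  exact Nat.and_or_distrib_right x y 2047

theorem ofNat_shr (m : Nat) (k : Nat) : (Int.ofNat m) >>> k = Int.ofNat (m >>> k) := rfl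

theorem natCast_shr (m : Nat) (k : Nat) : ((m : Nat) : Int) >>> k = ((m >>> k : Nat) : Int) := rfl

theorem negSucc_shr (m : Nat) (k : Nat) : (Int.negSucc m) >>> k = Int.negSucc (m >>> k) := rfl

-- shift-right distributes over Python `|`
theorem bor_shift (a b : Int) :
    (PySem.Int.bor a b) >>> (11 : Nat) = PySem.Int.bor (a >>> (11 : Nat)) (b >>> (11 : Nat)) := by
  cases a with
  | ofNat m =>
      cases b with
      | ofNat n =>
          simp only [Int.ofNat_eq_natCast, PySem.Int.bor_natCast]
          rw [natCast_shr, natCast_shr, natCast_shr, PySem.Int.bor_natCast,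
            Nat.shiftRight_or_distrib]
      | negSucc n =>
          rw [bor_ofNat_negSucc, ofNat_shr, negSucc_shr, negSucc_shr, bor_ofNat_negSucc,
            nat_sub_and_shift]
  | negSucc m =>
      cases b with
      | ofNat n =>
          rw [bor_negSucc_ofNat, ofNat_shr, negSucc_shr, negSucc_shr, bor_negSucc_ofNat,
            nat_sub_and_shift]
      | negSucc n =>
          rw [bor_negSucc_negSucc, negSucc_shr, negSucc_shr, negSucc_shr, bor_negSucc_negSucc,
            Nat.shiftRight_and_distrib]

-- low 11 bits of `a | b` ignore b when b ≡ 0 (mod 2048)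
theorem bor_mod (a b : Int) (hb : b % 2048 = 0) :
    (PySem.Int.bor a b) % 2048 = a % 2048 := by
  cases a with
  | ofNat m =>
      cases b with
      | ofNat n =>
          have hn : n % 2048 = 0 := by simp [Int.ofNat_eq_natCast] at hb; omega
          simp only [Int.ofNat_eq_natCast, PySem.Int.bor_natCast]
          have := or_mod m n
          rw [hn, Nat.or_zero] at this
          omega
      | negSucc n =>
          rw [bor_ofNat_negSucc]
          have hn : n % 2048 = 2047 := by rw [Int.negSucc_eq] at hb; omega
          have hy : (n &&& m) % 2048 = (n % 2048) &&& (m % 2048) := and_mod n m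
          have hmm := Nat.and_two_pow_sub_one_eq_mod (m % 2048) 11
          norm_num at hmm
          have h2047 : 2047 &&& (m % 2048) = (m % 2048) &&& 2047 := Nat.and_comm _ _
          have hle : n &&& m ≤ n := Nat.and_le_left
          have hym : (n &&& m) % 2048 = m % 2048 := by rw [hy, hn, h2047, hmm]
          rw [Int.negSucc_eq, Int.ofNat_eq_natCast]
          omega
  | negSucc m =>
      cases b with
      | ofNat n =>
          have hn : n % 2048 = 0 := by simp [Int.ofNat_eq_natCast] at hb; omega
          rw [bor_negSucc_ofNat]
          have hy : (m &&& n) % 2048 = (m % 2048) &&& (n % 2048) := and_mod m n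
          rw [hn, Nat.and_zero] at hy
          have hle : m &&& n ≤ m := Nat.and_le_left
          rw [Int.negSucc_eq, Int.negSucc_eq]
          omega
      | negSucc n =>
          have hn : n % 2048 = 2047 := by rw [Int.negSucc_eq] at hb; omega
          rw [bor_negSucc_negSucc]
          have hy : (m &&& n) % 2048 = (m % 2048) &&& (n % 2048) := and_mod m n
          have hmm := Nat.and_two_pow_sub_one_eq_mod (m % 2048) 11
          norm_num at hmm
          have hym : (m &&& n) % 2048 = m % 2048 := by rw [hy, hn, hmm]
          have hle : m &&& n ≤ m := Nat.and_le_left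
          rw [Int.negSucc_eq, Int.negSucc_eq]
          omega

theorem shl_pow (x : Int) (c : Nat) (hc : 11 ≤ c) : x <<< c = (x * 2 ^ (c - 11)) * 2048 := by
  rw [Int.shiftLeft_eq, mul_assoc]
  congr 1
  rw [show (2048 : Int) = 2 ^ 11 by norm_num, ← pow_add]
  congr 1
  omega

theorem shl_mod (x : Int) (c : Nat) (hc : 11 ≤ c) : (x <<< c) % 2048 = 0 := by
  rw [shl_pow x c hc]
  exact Int.mul_emod_left _ _

theorem shl_shift (x : Int) (c : Nat) (hc : 11 ≤ c) :
    (x <<< c) >>> (11 : Nat) = x <<< (c - 11) := by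
  rw [Int.shiftRight_eq_div_pow, shl_pow x c hc, Int.shiftLeft_eq]
  norm_num

-- the big OR-accumulator, parameterised by the current bit offset
def bigFrom (s : Int) (c : Nat) : List Int → Int
  | [] => s
  | b :: bs => bigFrom (PySem.Int.bor s (b <<< c)) (c + 8) bs

theorem bigFrom_mod (bs : List Int) (s : Int) (c : Nat) (hc : 11 ≤ c) :
    (bigFrom s c bs) % 2048 = s % 2048 := by
  induction bs generalizing s c with
  | nil => rfl
  | cons b bs ih =>
      rw [bigFrom, ih _ _ (by omega), bor_mod _ _ (shl_mod b c hc)]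

theorem bigFrom_shift (bs : List Int) (s : Int) (c : Nat) (hc : 11 ≤ c) :
    (bigFrom s c bs) >>> (11 : Nat) = bigFrom (s >>> (11 : Nat)) (c - 11) bs := by
  induction bs generalizing s c with
  | nil => rfl
  | cons b bs ih =>
      rw [bigFrom, ih _ _ (by omega), bor_shift, shl_shift b c hc, bigFrom]
      have : c + 8 - 11 = c - 11 + 8 := by omega
      rw [this]

theorem extract_append (k : Nat) (big : Int) (pwm : List Int) :
    extractLoop k big pwm = pwm ++ extractLoop k big [] := by
  induction k generalizing big pwm with
  | zero => simp [extractLoop]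
  | succ k ih =>
      rw [extractLoop, extractLoop, ih (big >>> (11:Nat)) ([] ++ _),
        ih (big >>> (11:Nat)) (pwm ++ _)]
      simp

theorem main_A (bs : List Int) (s : Int) (c : Nat) (acc : List Int) (hc : c ≤ 10) :
    (List.foldl aStep (s, ((c : Nat) : Int), acc) bs).2.2
      = acc ++ extractLoop ((c + 8 * bs.length) / 11) (bigFrom s c bs) [] := by
  induction bs generalizing s c acc with
  | nil =>
      simp [bigFrom, extractLoop, Nat.div_eq_of_lt (show c < 11 by omega)]
  | cons b bs ih =>
      simp only [List.foldl_cons, aStep, Int.toNat_natCast, List.length_cons]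
      by_cases hc3 : 3 ≤ c
      · rw [crsfWhile, dif_pos (by omega), crsfWhile, dif_neg (by omega)]
        have hcast : ((c : Int) + 8 - 11) = (((c - 3 : Nat) : Nat) : Int) := by omega
        rw [hcast, ih _ (c - 3) _ (by omega)]
        rw [show bigFrom s c (b :: bs) = bigFrom (PySem.Int.bor s (b <<< c)) (c + 8) bs from rfl]
        have hch : c + 8 * (bs.length + 1) = ((c - 3) + 8 * bs.length) + 11 := by omega
        rw [hch, Nat.add_div_right _ (by norm_num), extractLoop]
        have hv : PySem.Int.band (bigFrom (PySem.Int.bor s (b <<< c)) (c + 8) bs) 2047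
            = PySem.Int.band (PySem.Int.bor s (b <<< c)) 2047 := by
          rw [band_mask, band_mask]
          exact bigFrom_mod bs _ (c + 8) (by omega)
        have hs : (bigFrom (PySem.Int.bor s (b <<< c)) (c + 8) bs) >>> (11 : Nat)
            = bigFrom ((PySem.Int.bor s (b <<< c)) >>> (11 : Nat)) (c - 3) bs := by
          have h := bigFrom_shift bs (PySem.Int.bor s (b <<< c)) (c + 8) (by omega)
          rwa [show c + 8 - 11 = c - 3 by omega] at h
        rw [hv, hs, extract_append _ _ ([] ++ _)]
        simp
      · rw [crsfWhile, dif_neg (by omega)]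
        have hcast : ((c : Int) + 8) = (((c + 8 : Nat) : Nat) : Int) := by push_cast; ring
        rw [hcast, ih _ (c + 8) _ (by omega)]
        rw [show bigFrom s c (b :: bs) = bigFrom (PySem.Int.bor s (b <<< c)) (c + 8) bs from rfl]
        have hch : c + 8 * (bs.length + 1) = (c + 8) + 8 * bs.length := by omega
        rw [hch]

theorem main_B (bs : List Int) (s : Int) (i : Nat) :
    List.foldl bStep (s, ((i : Nat) : Int)) bs
      = (bigFrom s (8 * i) bs, ((i + bs.length : Nat) : Int)) := by
  induction bs generalizing s i with
  | nil => simp [bigFrom]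
  | cons b bs ih =>
      simp only [List.foldl_cons, bStep]
      rw [show (8 * (i : Int)) = ((8 * i : Nat) : Int) by push_cast; ring, Int.toNat_natCast,
        show ((i : Int) + 1) = (((i + 1 : Nat) : Nat) : Int) by push_cast; ring,
        ih _ (i + 1)]
      rw [show bigFrom s (8 * i) (b :: bs) = bigFrom (PySem.Int.bor s (b <<< (8 * i))) (8 * i + 8) bs from rfl]
      rw [show 8 * (i + 1) = 8 * i + 8 by omega]
      simp [List.length_cons]
      omega

-- ===== VERDICT (by name: the statement is the Claim_ definition above) =====
theorem crsf2pwm_spec : Claim_equal_crsf2pwm := by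
  intro bs _
  unfold Spec_crsf2pwm crsf2pwm crsf2pwm_alt
  have hA := main_A bs 0 0 [] (by omega)
  have hB := main_B bs 0 0
  norm_num at hA hB
  rw [hA, hB]
  dsimp only
  rw [show (8 * (bs.length : Int)) = ((8 * bs.length : Nat) : Int) by push_cast; ring,
    show (11 : Int) = ((11 : Nat) : Int) by norm_num,
    PySem.Int.floordiv_natCast, Int.toNat_natCast]
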